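-- pv_equiv track=rewrite | github.com/0xyuzi/JobPrep | coding_interviews/pramp/time_planner_best_solution.py | meeting_planner
-- ===== SOURCE A (Python) =====
-- def meeting_planner(slotsA, slotsB, dur):
-- # edge cases: slot empty per either one of the two
--     if not slotsA or not slotsB:
--         return []
--
--     # all durs in one person's slot is less than the required dur
--
--     i, j = 0,0
--     while i < len(slotsA)and j < len(slotsB):
--
--         start = max(slotsA[i][0], slotsB[j][0])
--         end = min(slotsA[i][1], slotsB[j][1])
--
--         if end-start >= dur:
--           return [start, start + dur]
--
--         if slotsA[i][1] < slotsB[j][1]: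
--             i += 1
--         else:
--             j += 1
-- ===== SOURCE B (Python) =====
-- def concurrent_pairs(slotsA, slotsB):
--     """Yield each pair of slots that are simultaneously current when the two
--     agendas are replayed side by side, retiring whichever slot ends first."""
--     while slotsA and slotsB:
--         yield slotsA[0], slotsB[0]
--         if slotsA[0][1] < slotsB[0][1]:
--             slotsA = slotsA[1:]
--         else:
--             slotsB = slotsB[1:]
--
--
-- def meeting_planner(slotsA, slotsB, dur):
--     start = next((max(a[0], b[0]) for a, b in concurrent_pairs(slotsA, slotsB)
--                   if min(a[1], b[1]) - max(a[0], b[0]) >= dur), None)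
--     return [] if start is None else [start, start + dur]
-- ===== Notes on version B (the rewrite author's own statement) =====
-- stated objective: alternative
-- what changed: Splits A's fused two-pointer index loop into a staged pipeline: a generator that replays both agendas and yields each pair of simultaneously-current slots, and a separate consumer that takes the first yielded pair with enough overlap via next() over a filtered stream; it returns [] uniformly instead of falling off the function with None.
-- outside the precondition, e.g. on meeting_planner([[0, 1]], [[5, 6]], 1): A returns None, B returns []
import Mathlib
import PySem

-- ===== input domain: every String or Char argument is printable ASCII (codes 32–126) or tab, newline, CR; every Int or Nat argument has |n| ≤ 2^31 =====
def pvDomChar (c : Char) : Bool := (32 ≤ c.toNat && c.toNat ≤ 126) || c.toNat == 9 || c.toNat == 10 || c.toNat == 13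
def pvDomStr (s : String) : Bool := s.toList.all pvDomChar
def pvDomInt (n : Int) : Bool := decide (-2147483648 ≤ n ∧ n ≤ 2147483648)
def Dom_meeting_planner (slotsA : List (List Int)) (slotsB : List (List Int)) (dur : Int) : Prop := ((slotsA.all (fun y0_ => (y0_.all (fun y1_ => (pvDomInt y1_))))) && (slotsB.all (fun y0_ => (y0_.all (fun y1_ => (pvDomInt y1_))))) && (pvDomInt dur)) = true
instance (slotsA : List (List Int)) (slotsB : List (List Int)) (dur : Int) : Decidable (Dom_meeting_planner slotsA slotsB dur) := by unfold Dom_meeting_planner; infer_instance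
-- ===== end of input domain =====

-- B splits A's fused two-pointer index loop into a staged pipeline — a producer of the pairs of
-- simultaneously-current slots and a first-match consumer — and returns [] instead of None.

-- slot[0] / slot[1] of an interval; on slots shorter than 2 Python raises IndexError,
-- which Pre_meeting_planner excludes, so the default 0 is never reached on admitted inputs.
def slot0 (l : List Int) : Int := l.headD 0
def slot1 (l : List Int) : Int :=
  match l with
  | _ :: b :: _ => b
  | _ => 0

-- start = max of the two starts; overlap = min of the two ends minus start (both Pythons compute these)
def startOf (a b : List Int) : Int := max (slot0 a) (slot0 b)
def overlapOf (a b : List Int) : Int := min (slot1 a) (slot1 b) - startOf a b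

-- ===== PORT A =====
-- the while loop of A, recursion on the two indices i and j
def mpLoop (slotsA : List (List Int)) (slotsB : List (List Int)) (dur : Int) (i j : Nat) : List Int :=
  if h : i < slotsA.length ∧ j < slotsB.length then
    if dur ≤ overlapOf (slotsA[i]'h.1) (slotsB[j]'h.2) then
      [startOf (slotsA[i]'h.1) (slotsB[j]'h.2), startOf (slotsA[i]'h.1) (slotsB[j]'h.2) + dur]
    else if slot1 (slotsA[i]'h.1) < slot1 (slotsB[j]'h.2) then
      mpLoop slotsA slotsB dur (i+1) j
    else
      mpLoop slotsA slotsB dur i (j+1)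
  else
    []  -- Python falls off the function and returns None here; Pre_meeting_planner excludes it
termination_by (slotsA.length - i) + (slotsB.length - j)
decreasing_by all_goals omega

def meeting_planner (slotsA : List (List Int)) (slotsB : List (List Int)) (dur : Int) : List Int :=
  if slotsA = [] ∨ slotsB = [] then []
  else mpLoop slotsA slotsB dur 0 0

-- ===== PORT B =====
-- Source B's producer: the stream of pairs of simultaneously-current slots, the two suffix lists
-- standing for the replayed agendas (slotsA[1:] / slotsB[1:])
def concurrentPairs : List (List Int) → List (List Int) → List ((List Int) × (List Int))
  | a :: restA, b :: restB =>
    (a, b) :: (if slot1 a < slot1 b then concurrentPairs restA (b :: restB)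
               else concurrentPairs (a :: restA) restB)
  | _, _ => []
termination_by X Y => X.length + Y.length
decreasing_by all_goals (simp only [List.length_cons]; omega)

-- Source B's consumer: next((max(a[0],b[0]) for a, b in … if min(a[1],b[1]) - max(a[0],b[0]) >= dur), None)
def meeting_planner_alt (slotsA : List (List Int)) (slotsB : List (List Int)) (dur : Int) : List Int :=
  match (concurrentPairs slotsA slotsB).findSome?
      (fun p => if dur ≤ overlapOf p.1 p.2 then some (startOf p.1 p.2) else none) with
  | none => []
  | some start => [start, start + dur]

-- ===== PRECONDITION & SPEC =====
-- Whether A's left-to-right scan reaches a pair of slots overlapping for at least dur,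
-- reading only well-formed (length ≥ 2) slots on the way: exactly the inputs on which A
-- can produce a slot rather than raise or fall through.
-- scanB: the scan while the current left slot a stays: true/false = met / cannot meet,
-- inr B' = the left pointer must advance, B' still to be consumed
def scanB (a : List Int) : List (List Int) → Int → Bool ⊕ List (List Int)
  | [], _ => .inl false
  | b :: restb, dur =>
    if 2 ≤ a.length ∧ 2 ≤ b.length then
      if dur ≤ overlapOf a b then .inl true
      else if slot1 a < slot1 b then .inr (b :: restb)
      else scanB a restb dur
    else .inl false

def canMeet : List (List Int) → List (List Int) → Int → Bool
  | [], _, _ => false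
  | a :: resta, B, dur =>
    match scanB a B dur with
    | .inl r => r
    | .inr B' => canMeet resta B' dur

-- Pre_ holds exactly where the Python A returns a list: one of the slot lists is empty
-- (A returns [] at once), or the scan meets a sufficient overlap through well-formed slots.
-- It excludes the inputs where A raises IndexError (the scan reaches a slot shorter than 2)
-- and those where A falls off the loop and returns None, which is not a list value.
def Pre_meeting_planner (slotsA : List (List Int)) (slotsB : List (List Int)) (dur : Int) : Prop :=
  slotsA = [] ∨ slotsB = [] ∨ canMeet slotsA slotsB dur = true

instance (slotsA : List (List Int)) (slotsB : List (List Int)) (dur : Int) : Decidable (Pre_meeting_planner slotsA slotsB dur) := by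
  unfold Pre_meeting_planner; infer_instance

def pvWitness_meeting_planner : List (List Int) × List (List Int) × Int := ([[0, 2]], [[1, 3]], 1)

def Spec_meeting_planner (slotsA : List (List Int)) (slotsB : List (List Int)) (dur : Int) (out : List Int) : Prop := out = meeting_planner_alt slotsA slotsB dur
instance (slotsA : List (List Int)) (slotsB : List (List Int)) (dur : Int) (out : List Int) : Decidable (Spec_meeting_planner slotsA slotsB dur out) := by unfold Spec_meeting_planner; infer_instance

-- ===== CLAIM (what is proved, stated in full; the proofs are below) =====
def Claim_equal_meeting_planner : Prop := ∀ (slotsA : List (List Int)) (slotsB : List (List Int)) (dur : Int), Dom_meeting_planner slotsA slotsB dur → Pre_meeting_planner slotsA slotsB dur → Spec_meeting_planner slotsA slotsB dur (meeting_planner slotsA slotsB dur)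

-- ===== LEMMAS AND PROOFS =====

-- B's pipeline applied to a pair of suffixes, as one Option-valued search
def searchFrom (dur : Int) (X Y : List (List Int)) : Option Int :=
  (concurrentPairs X Y).findSome?
    (fun p => if dur ≤ overlapOf p.1 p.2 then some (startOf p.1 p.2) else none)

lemma concurrentPairs_nil_left (Y : List (List Int)) : concurrentPairs [] Y = [] := by
  rw [concurrentPairs.eq_def]

lemma concurrentPairs_nil_right (X : List (List Int)) : concurrentPairs X [] = [] := by
  rw [concurrentPairs.eq_def]; cases X <;> rfl

-- A's index loop at state (i, j) computes what B's pipeline computes on the two suffixes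
lemma mpLoop_eq_searchFrom (slotsA slotsB : List (List Int)) (dur : Int) :
    ∀ (k i j : Nat), (slotsA.length - i) + (slotsB.length - j) ≤ k →
      mpLoop slotsA slotsB dur i j =
        (match searchFrom dur (slotsA.drop i) (slotsB.drop j) with
          | none => []
          | some s => [s, s + dur]) := by
  intro k
  induction k with
  | zero =>
    intro i j hk
    have hA : slotsA.length ≤ i := by omega
    rw [mpLoop, dif_neg (by omega)]
    rw [List.drop_of_length_le hA]
    simp [searchFrom, concurrentPairs_nil_left]
  | succ k ih =>
    intro i j hk
    by_cases h : i < slotsA.length ∧ j < slotsB.length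
    · rw [mpLoop, dif_pos h]
      rw [List.drop_eq_getElem_cons h.1, List.drop_eq_getElem_cons h.2]
      unfold searchFrom
      rw [concurrentPairs]
      rw [List.findSome?_cons]
      by_cases hv : dur ≤ overlapOf (slotsA[i]'h.1) (slotsB[j]'h.2)
      · simp only [if_pos hv]
      · simp only [if_neg hv]
        by_cases hadv : slot1 (slotsA[i]'h.1) < slot1 (slotsB[j]'h.2)
        · rw [if_pos hadv, if_pos hadv, ih (i+1) j (by omega)]
          unfold searchFrom
          rw [List.drop_eq_getElem_cons h.2]
        · rw [if_neg hadv, if_neg hadv, ih i (j+1) (by omega)]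
          unfold searchFrom
          rw [List.drop_eq_getElem_cons h.1]
    · rw [mpLoop, dif_neg h]
      rcases Nat.lt_or_ge i slotsA.length with hi | hi
      · have hj : slotsB.length ≤ j := by omega
        rw [List.drop_of_length_le hj]
        simp [searchFrom, concurrentPairs_nil_right]
      · rw [List.drop_of_length_le hi]
        simp [searchFrom, concurrentPairs_nil_left]

-- ===== VERDICT (by name: the statement is the Claim_ definition above) =====
theorem meeting_planner_spec : Claim_equal_meeting_planner := by
  intro slotsA slotsB dur _ _
  unfold Spec_meeting_planner meeting_planner meeting_planner_alt
  by_cases hA : slotsA = []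
  · subst hA
    rw [if_pos (Or.inl rfl)]
    rw [concurrentPairs_nil_left]
    rfl
  by_cases hB : slotsB = []
  · subst hB
    rw [if_pos (Or.inr rfl)]
    rw [concurrentPairs_nil_right]
    rfl
  rw [if_neg (by simp [hA, hB])]
  have := mpLoop_eq_searchFrom slotsA slotsB dur (slotsA.length + slotsB.length) 0 0 (by omega)
  simpa [searchFrom] using this
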